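-- pv_equiv track=rewrite | github.com/eggybricks/self-driving-lego-trains | scenario 05 - 1 remote-controlled train with leader, color pattern/train_csx_05.py | consolidate_colors
-- ===== SOURCE A (Python) =====
-- def consolidate_colors(color_history, min_repeats=2):
--     """
--     Convert a list of colors into a stable pattern by removing outliers.
--     A color must be seen min_repeats times to be considered real.
--     Returns list of colors with outliers removed.
--     """
--     if not color_history:
--         return []
--
--     # Group consecutive same colors
--     groups = []
--     current_color = color_history[0]
--     current_count = 1
--
--     for color in color_history[1:]:
--         if color == current_color:
--             current_count += 1
--         else:
--             groups.append((current_color, current_count))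
--             current_color = color
--             current_count = 1
--     groups.append((current_color, current_count))
--
--     # Keep only colors that appear enough times
--     stable_colors = []
--     for color, count in groups:
--         if count >= min_repeats:
--             if not stable_colors or stable_colors[-1] != color:
--                 stable_colors.append(color)
--
--     return stable_colors
-- ===== SOURCE B (Python) =====
-- def consolidate_colors(color_history, min_repeats=2):
--     """Single streaming pass: emit each qualifying run as it closes, no groups list."""
--     def flush(out, cur, cnt):
--         if cnt > 0 and cnt >= min_repeats and (not out or out[-1] != cur):
--             out.append(cur)
--
--     out = []
--     cur, cnt = 0, 0
--     for color in color_history: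
--         if cnt > 0 and color == cur:
--             cnt += 1
--         else:
--             flush(out, cur, cnt)
--             cur, cnt = color, 1
--     flush(out, cur, cnt)
--     return out
-- ===== Notes on version B (the rewrite author's own statement) =====
-- stated objective: simpler
-- what changed: B fuses A's two phases (build a groups list of (color,count) pairs, then filter/dedup it) into a single streaming pass that emits each qualifying run inline as it closes, never materialising the groups list.
import Mathlib
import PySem

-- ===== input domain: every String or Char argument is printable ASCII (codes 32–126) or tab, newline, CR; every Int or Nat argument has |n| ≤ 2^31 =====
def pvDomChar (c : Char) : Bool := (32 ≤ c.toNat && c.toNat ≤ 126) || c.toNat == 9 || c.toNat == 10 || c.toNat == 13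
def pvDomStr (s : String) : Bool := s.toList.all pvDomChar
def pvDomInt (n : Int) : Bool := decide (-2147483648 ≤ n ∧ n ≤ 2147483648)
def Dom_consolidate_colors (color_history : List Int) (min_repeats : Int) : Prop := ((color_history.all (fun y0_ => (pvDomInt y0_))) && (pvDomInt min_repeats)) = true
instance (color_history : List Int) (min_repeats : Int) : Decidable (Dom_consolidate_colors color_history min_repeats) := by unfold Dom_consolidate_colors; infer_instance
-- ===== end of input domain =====

-- B fuses A's two passes (group runs, then filter/dedup) into one streaming pass emitting qualifying runs inline; objective: simpler.


-- ===== PORT A =====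
-- first loop of A: group consecutive equal colors into (color, count) pairs
def groupsA (gs : List (Int × Int)) (cur : Int) (cnt : Int) : List Int → List (Int × Int)
  | [] => gs ++ [(cur, cnt)]
  | c :: r => if c = cur then groupsA gs cur (cnt + 1) r else groupsA (gs ++ [(cur, cnt)]) c 1 r

-- second loop of A: keep runs with count ≥ min_repeats, skipping a color equal to the last kept one
def keepA (mr : Int) (st : List Int) : List (Int × Int) → List Int
  | [] => st
  | (c, n) :: r =>
      keepA mr (if mr ≤ n then (if st.getLast? ≠ some c then st ++ [c] else st) else st) r

def consolidate_colors (color_history : List Int) (min_repeats : Int) : List Int :=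
  match color_history with
  | [] => []
  | c0 :: rest => keepA min_repeats [] (groupsA [] c0 1 rest)

-- ===== PORT B =====
-- B's flush helper: emit the closed run if nonempty, long enough and not equal to the last emitted color
def flushB (mr : Int) (out : List Int) (cur : Int) (cnt : Int) : List Int :=
  if 0 < cnt ∧ mr ≤ cnt ∧ out.getLast? ≠ some cur then out ++ [cur] else out

-- B's single streaming loop
def goB (mr : Int) (out : List Int) (cur : Int) (cnt : Int) : List Int → List Int
  | [] => flushB mr out cur cnt
  | c :: r => if 0 < cnt ∧ c = cur then goB mr out cur (cnt + 1) r
              else goB mr (flushB mr out cur cnt) c 1 r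

def consolidate_colors_alt (color_history : List Int) (min_repeats : Int) : List Int :=
  goB min_repeats [] 0 0 color_history

-- ===== PRECONDITION & SPEC =====
def Spec_consolidate_colors (color_history : List Int) (min_repeats : Int) (out : List Int) : Prop := out = consolidate_colors_alt color_history min_repeats
instance (color_history : List Int) (min_repeats : Int) (out : List Int) : Decidable (Spec_consolidate_colors color_history min_repeats out) := by unfold Spec_consolidate_colors; infer_instance

-- ===== CLAIM (what is proved, stated in full; the proofs are below) =====
def Claim_equal_consolidate_colors : Prop := ∀ (color_history : List Int) (min_repeats : Int), Dom_consolidate_colors color_history min_repeats → Spec_consolidate_colors color_history min_repeats (consolidate_colors color_history min_repeats)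

-- ===== LEMMAS AND PROOFS =====
-- keepA is a left fold, so it distributes over append
theorem keepA_append (mr : Int) (st : List Int) (xs ys : List (Int × Int)) :
    keepA mr st (xs ++ ys) = keepA mr (keepA mr st xs) ys := by
  induction xs generalizing st with
  | nil => simp [keepA]
  | cons p r ih => cases p; simp [keepA, ih]

-- flushing a nonempty run is exactly one keepA step
theorem flushB_eq_keepA (mr : Int) (out : List Int) (cur cnt : Int) (h : 0 < cnt) :
    flushB mr out cur cnt = keepA mr out [(cur, cnt)] := by
  simp only [flushB, keepA]
  by_cases h1 : mr ≤ cnt <;> by_cases h2 : out.getLast? ≠ some cur <;>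
    simp [h, h1, h2]

-- main invariant: B's fused loop from a state matching A's equals A's two-phase result
theorem goB_eq (mr : Int) (rest : List Int) (cur cnt : Int) (gs : List (Int × Int))
    (h : 0 < cnt) :
    goB mr (keepA mr [] gs) cur cnt rest = keepA mr [] (groupsA gs cur cnt rest) := by
  induction rest generalizing gs cur cnt with
  | nil =>
      simp only [goB, groupsA, keepA_append, flushB_eq_keepA mr _ cur cnt h]
  | cons c r ih =>
      simp only [goB, groupsA]
      by_cases hc : c = cur
      · simp only [h, hc, and_true, if_pos trivial]
        exact ih cur (cnt + 1) gs (by omega)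
      · have : ¬ (0 < cnt ∧ c = cur) := by tauto
        rw [if_neg this, if_neg hc, flushB_eq_keepA mr _ cur cnt h, ← keepA_append]
        exact ih c 1 (gs ++ [(cur, cnt)]) (by omega)

-- ===== VERDICT (by name: the statement is the Claim_ definition above) =====
theorem consolidate_colors_spec : Claim_equal_consolidate_colors := by
  intro ch mr _
  unfold Spec_consolidate_colors consolidate_colors consolidate_colors_alt
  match ch with
  | [] => simp [goB, flushB]
  | c0 :: rest =>
      have : goB mr [] 0 0 (c0 :: rest) = goB mr (keepA mr [] []) c0 1 rest := by
        simp [goB, flushB, keepA]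
      rw [this, goB_eq mr rest c0 1 [] (by omega)]
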